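-- pv_equiv track=rewrite | github.com/park-geun-hyeong/Algorithm | softeer/playfair_cipher.py | third
-- ===== SOURCE A (Python) =====
-- def third(m, mat):
--     f,s = m
--     n= len(mat)
--     first_idx=[0,0]
--     second_idx=[0,0]
--     for row in range(n):
--         for col in range(n):
--             if mat[row][col] == f:
--                 first_idx[0] = row
--                 first_idx[1] = col
--             if mat[row][col] == s:
--                 second_idx[0] = row
--                 second_idx[1] = col
--
--
--     return [mat[first_idx[0]][second_idx[1]], mat[second_idx[0]][first_idx[1]]]
-- ===== SOURCE B (Python) =====
-- def third(m, mat):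
--     f, s = m
--     n = len(mat)
--
--     def locate(ch):
--         # scan backwards, first hit = A's last occurrence; (0, 0) if absent
--         for r in range(n - 1, -1, -1):
--             row = mat[r]
--             for c in range(n - 1, -1, -1):
--                 if row[c] == ch:
--                     return r, c
--         return 0, 0
--
--     fr, fc = locate(f)
--     sr, sc = locate(s)
--     return [mat[fr][sc], mat[sr][fc]]
-- ===== Notes on version B (the rewrite author's own statement) =====
-- stated objective: alternative
-- what changed: B replaces A's single exhaustive forward pass that threads two mutable last-match index pairs through every cell by two independent backward searches that return at the FIRST hit (reverse row-major order, so the first hit is exactly A's last occurrence), with (0,0) as the not-found default.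
import Mathlib
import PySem

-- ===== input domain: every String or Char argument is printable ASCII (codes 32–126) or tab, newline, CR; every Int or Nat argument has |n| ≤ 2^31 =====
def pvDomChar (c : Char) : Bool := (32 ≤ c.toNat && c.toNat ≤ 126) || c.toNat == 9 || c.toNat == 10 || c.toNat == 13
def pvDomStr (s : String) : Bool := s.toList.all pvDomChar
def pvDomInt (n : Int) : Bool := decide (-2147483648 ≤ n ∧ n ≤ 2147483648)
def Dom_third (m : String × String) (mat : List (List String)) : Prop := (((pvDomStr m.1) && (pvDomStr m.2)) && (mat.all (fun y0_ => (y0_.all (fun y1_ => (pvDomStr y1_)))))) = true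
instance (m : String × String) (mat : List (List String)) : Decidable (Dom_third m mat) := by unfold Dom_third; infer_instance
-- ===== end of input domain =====

-- B replaces A's exhaustive forward pass threading two mutable last-match index pairs by two
-- independent backward searches that stop at the first hit (= A's last occurrence); objective: alternative.

-- ===== PORT A =====
-- mat[r][c]; the defaults are only reached outside Pre_third (where Python A raises IndexError)
def pvCellA (mat : List (List String)) (r c : Int) : String :=
  PySem.List.pyGetD (PySem.List.pyGetD mat r []) c ""

def third (m : String × String) (mat : List (List String)) : List String :=
  let f := m.1
  let s := m.2
  let n : Int := mat.length
  let st :=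
    (PySem.List.pyRange 0 n 1).foldl (fun st row =>
      (PySem.List.pyRange 0 n 1).foldl (fun st col =>
        ((if pvCellA mat row col == f then (row, col) else st.1),
         (if pvCellA mat row col == s then (row, col) else st.2))) st)
      (((0 : Int), (0 : Int)), ((0 : Int), (0 : Int)))
  [pvCellA mat st.1.1 st.2.2, pvCellA mat st.2.1 st.1.2]

-- ===== PORT B =====
-- mat[r][c] in Source B; defaults only reached outside Pre_third (where Python B raises IndexError)
def pvCellB (mat : List (List String)) (r c : Int) : String :=
  PySem.List.pyGetD (PySem.List.pyGetD mat r []) c ""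

-- inner 'for c in range(n-1,-1,-1): if row[c]==ch: return r,c' (early return = Option)
def pvLocRow (row : List String) (ch : String) (r : Int) : List Int → Option (Int × Int)
  | [] => none
  | c :: t =>
      if PySem.List.pyGetD row c "" == ch then some (r, c) else pvLocRow row ch r t

-- outer 'for r in range(n-1,-1,-1): …', returning the first hit, else none
def pvLocate (mat : List (List String)) (ch : String) (n : Int) : List Int → Option (Int × Int)
  | [] => none
  | r :: t =>
      match pvLocRow (PySem.List.pyGetD mat r []) ch r (PySem.List.pyRange (n - 1) (-1) (-1)) with
      | some p => some p
      | none => pvLocate mat ch n t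

def third_alt (m : String × String) (mat : List (List String)) : List String :=
  let n : Int := mat.length
  let rs := PySem.List.pyRange (n - 1) (-1) (-1)
  let fp := (pvLocate mat m.1 n rs).getD ((0 : Int), (0 : Int))
  let sp := (pvLocate mat m.2 n rs).getD ((0 : Int), (0 : Int))
  [pvCellB mat fp.1 sp.2, pvCellB mat sp.1 fp.2]

-- ===== PRECONDITION & SPEC =====
-- Pre_third excludes exactly the inputs where Python A raises IndexError: the empty matrix
-- (the final return indexes mat[0]) and matrices with a row shorter than len(mat) (the
-- column loop runs over range(len(mat))).
def Pre_third (m : String × String) (mat : List (List String)) : Prop :=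
  mat ≠ [] ∧ ∀ row ∈ mat, mat.length ≤ row.length
instance (m : String × String) (mat : List (List String)) : Decidable (Pre_third m mat) := by
  unfold Pre_third; infer_instance

def pvWitness_third : (String × String) × List (List String) :=
  (("a", "d"), [["a", "b"], ["c", "d"]])

def Spec_third (m : String × String) (mat : List (List String)) (out : List String) : Prop :=
  out = third_alt m mat
instance (m : String × String) (mat : List (List String)) (out : List String) :
    Decidable (Spec_third m mat out) := by unfold Spec_third; infer_instance

-- ===== CLAIM =====
def Claim_equal_third : Prop := ∀ (m : String × String) (mat : List (List String)),
  Dom_third m mat → Pre_third m mat → Spec_third m mat (third m mat)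

-- ===== LEMMAS AND PROOFS =====

-- last-match foldl = first match of the reversed list
theorem pv_foldl_if_eq_find_rev {α : Type} (p : α → Bool) (L : List α) (i : α) :
    L.foldl (fun a x => if p x then x else a) i = (L.reverse.find? p).getD i := by
  induction L using List.reverseRecOn generalizing i with
  | nil => rfl
  | append_singleton t a ih =>
      simp only [List.foldl_append, List.foldl_cons, List.foldl_nil,
        List.reverse_append, List.reverse_cons, List.reverse_nil, List.nil_append,
        List.cons_append, List.find?]
      by_cases h : p a = true
      · simp [h]
      · simp only [Bool.not_eq_true] at h
        simp [h, ih]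

-- A's nested row/col loop with two independent "last match" accumulators,
-- flattened to two folds over the row-major list of cells
theorem pv_A_flat (R C : List Int) (p q : Int → Int → Bool)
    (i : (Int × Int) × (Int × Int)) :
    R.foldl (fun st r => C.foldl (fun st c =>
        ((if p r c then (r, c) else st.1), (if q r c then (r, c) else st.2))) st) i =
      ((R.flatMap (fun r => C.map (fun c => (r, c)))).foldl
         (fun a rc => if p rc.1 rc.2 then rc else a) i.1,
       (R.flatMap (fun r => C.map (fun c => (r, c)))).foldl
         (fun a rc => if q rc.1 rc.2 then rc else a) i.2) := by
  induction R generalizing i with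
  | nil => rfl
  | cons r t ih =>
      obtain ⟨i1, i2⟩ := i
      simp only [List.foldl_cons, List.flatMap_cons, List.foldl_append, List.foldl_map]
      rw [PySem.List.foldl_prod_mk (f := fun a c => if p r c then (r, c) else a)
            (g := fun a c => if q r c then (r, c) else a), ih]

-- the inner backward row scan is find? over the (r, c) pairs of that row's column list
theorem pv_locRow_eq_find (row : List String) (ch : String) (r : Int) (cs : List Int) :
    pvLocRow row ch r cs =
      (cs.map (fun c => (r, c))).find?
        (fun rc => PySem.List.pyGetD row rc.2 "" == ch) := by
  induction cs with
  | nil => rfl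
  | cons c t ih =>
      simp only [pvLocRow, List.map_cons, List.find?]
      by_cases h : (PySem.List.pyGetD row c "" == ch) = true
      · simp [h]
      · simp only [Bool.not_eq_true] at h
        simp [h, ih]

-- the outer backward scan is find? over the reverse-row-major cell list
theorem pv_locate_eq_find (mat : List (List String)) (ch : String) (n : Int) (rs : List Int) :
    pvLocate mat ch n rs =
      (rs.flatMap (fun r => (PySem.List.pyRange (n - 1) (-1) (-1)).map (fun c => (r, c)))).find?
        (fun rc => pvCellB mat rc.1 rc.2 == ch) := by
  induction rs with
  | nil => rfl
  | cons r t ih =>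
      have h2 : ((PySem.List.pyRange (n - 1) (-1) (-1)).map (fun c => (r, c))).find?
            (fun rc => PySem.List.pyGetD (PySem.List.pyGetD mat r []) rc.2 "" == ch) =
          ((PySem.List.pyRange (n - 1) (-1) (-1)).map (fun c => (r, c))).find?
            (fun rc => pvCellB mat rc.1 rc.2 == ch) := by
        rw [List.find?_map, List.find?_map]; rfl
      simp only [pvLocate, List.flatMap_cons, List.find?_append,
        pv_locRow_eq_find, ih, h2]
      cases ((PySem.List.pyRange (n - 1) (-1) (-1)).map (fun c => (r, c))).find?
          (fun rc => pvCellB mat rc.1 rc.2 == ch) <;> rfl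

-- the reverse-row-major cell list is the reverse of the row-major one
theorem pv_cells_rev (R C : List Int) :
    (R.reverse.flatMap (fun r => C.reverse.map (fun c => (r, c)))) =
      (R.flatMap (fun r => C.map (fun c => (r, c)))).reverse := by
  rw [List.reverse_flatMap]
  simp only [List.map_reverse]
  rfl

theorem third_eq_alt (m : String × String) (mat : List (List String)) :
    third m mat = third_alt m mat := by
  have hcell : pvCellA = pvCellB := rfl
  simp only [third, third_alt]
  rw [hcell]
  rw [pv_A_flat (PySem.List.pyRange 0 (mat.length : Int) 1)
        (PySem.List.pyRange 0 (mat.length : Int) 1)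
        (fun r c => pvCellB mat r c == m.1) (fun r c => pvCellB mat r c == m.2)
        (((0 : Int), (0 : Int)), ((0 : Int), (0 : Int)))]
  rw [pv_locate_eq_find, pv_locate_eq_find]
  have hrev : PySem.List.pyRange ((mat.length : Int) - 1) (-1) (-1) =
      (PySem.List.pyRange 0 (mat.length : Int) 1).reverse := by
    rw [PySem.List.pyRange_neg_one_eq_reverse]
    norm_num
  rw [hrev, pv_cells_rev]
  rw [pv_foldl_if_eq_find_rev, pv_foldl_if_eq_find_rev]

-- ===== VERDICT =====
theorem third_spec : Claim_equal_third := by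
  intro m mat _ _
  unfold Spec_third
  exact third_eq_alt m mat
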